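-- pv_equiv track=rewrite | github.com/maoyc/NodeConcealTec | kshellAttack/exercise.py | node_k
-- ===== SOURCE A (Python) =====
-- def node_k(graph, distribution):
--     node_list_k = []
--     for node in graph:
--         for key, values in distribution.items():
--             if node in values:
--                 a = '0x{:02X}'.format(key)
--                 colo = '#FF00' + a[2:]
--                 node_list_k.append(colo)
--                 break
--         continue
--
--     return node_list_k
-- ===== SOURCE B (Python) =====
-- def node_k(graph, distribution):
--     first_key = {}
--     for key, values in distribution.items():
--         for v in values:
--             if v not in first_key:
--                 first_key[v] = key
--     out = []
--     for node in graph: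
--         if node in first_key:
--             out.append('#FF00' + '{:02X}'.format(first_key[node]))
--     return out
-- ===== Notes on version B (the rewrite author's own statement) =====
-- stated objective: faster
-- what changed: Instead of rescanning the whole distribution for every node, B builds a node-to-first-key dict once and maps each node with a single O(1) lookup.
import Mathlib
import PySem

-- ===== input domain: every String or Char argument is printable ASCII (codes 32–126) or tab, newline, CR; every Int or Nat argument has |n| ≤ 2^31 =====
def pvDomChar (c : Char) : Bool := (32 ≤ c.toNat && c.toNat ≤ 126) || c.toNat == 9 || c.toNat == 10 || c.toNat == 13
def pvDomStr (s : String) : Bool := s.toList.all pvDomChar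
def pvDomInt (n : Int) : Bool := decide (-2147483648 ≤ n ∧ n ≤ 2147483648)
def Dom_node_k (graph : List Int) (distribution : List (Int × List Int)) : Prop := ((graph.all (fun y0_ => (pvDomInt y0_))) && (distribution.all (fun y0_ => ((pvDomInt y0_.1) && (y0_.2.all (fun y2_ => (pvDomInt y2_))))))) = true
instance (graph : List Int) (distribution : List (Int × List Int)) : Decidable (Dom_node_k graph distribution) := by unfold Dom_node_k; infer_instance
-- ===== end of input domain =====

-- B replaces A's rescan of the whole distribution for every node by a node→first-key
-- dict built once, then a single pass over the nodes (asymptotically faster).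

-- ===== PORT A =====
-- exact port of Python's '{:02X}'.format(key): uppercase hex digits of |key|,
-- zero-padded to total width 2 ('-' counts toward the width, so negatives never pad here)
def hexDigit (n : Nat) : Char := if n < 10 then Char.ofNat (48 + n) else Char.ofNat (55 + n)

def hexChars (n : Nat) : List Char :=
  if _h : n < 16 then [hexDigit n]
  else hexChars (n / 16) ++ [hexDigit (n % 16)]
decreasing_by exact Nat.div_lt_self (by omega) (by omega)

def fmt02X (key : Int) : List Char :=
  if key < 0 then '-' :: hexChars key.natAbs
  else if key < 16 then '0' :: hexChars key.natAbs
  else hexChars key.natAbs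

-- the inner 'for key, values in distribution.items(): … break' loop of A
def innerLoopA (acc : List String) (node : Int) : List (Int × List Int) → List String
  | [] => acc
  | (key, values) :: rest =>
      if node ∈ values then
        -- a = '0x{:02X}'.format(key); colo = '#FF00' + a[2:]
        acc ++ [String.mk ("#FF00".toList ++ (('0' :: 'x' :: fmt02X key).drop 2))]
      else innerLoopA acc node rest

def node_k (graph : List Int) (distribution : List (Int × List Int)) : List String :=
  graph.foldl (fun acc node => innerLoopA acc node distribution) []

-- ===== PORT B =====
def buildFirstKey (distribution : List (Int × List Int)) : PySem.Dict Int Int :=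
  distribution.foldl
    (fun d kv => kv.2.foldl (fun d v => if d.contains v then d else d.insert v kv.1) d)
    PySem.Dict.empty

def node_k_alt (graph : List Int) (distribution : List (Int × List Int)) : List String :=
  let m := buildFirstKey distribution
  graph.foldl
    (fun out node =>
      match m.get? node with
      | some k => out ++ [String.mk ("#FF00".toList ++ fmt02X k)]
      | none => out) []

-- ===== PRECONDITION & SPEC =====
def Spec_node_k (graph : List Int) (distribution : List (Int × List Int)) (out : List String) : Prop := out = node_k_alt graph distribution
instance (graph : List Int) (distribution : List (Int × List Int)) (out : List String) : Decidable (Spec_node_k graph distribution out) := by unfold Spec_node_k; infer_instance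

-- ===== CLAIM (what is proved, stated in full; the proofs are below) =====
def Claim_equal_node_k : Prop := ∀ (graph : List Int) (distribution : List (Int × List Int)), Dom_node_k graph distribution → Spec_node_k graph distribution (node_k graph distribution)

-- ===== LEMMAS AND PROOFS =====

-- the first key of distribution whose value list contains node
def firstKey : List (Int × List Int) → Int → Option Int
  | [], _ => none
  | (k, vs) :: rest, node => if node ∈ vs then some k else firstKey rest node

theorem get?_innerFold (vs : List Int) (k : Int) (d : PySem.Dict Int Int) (x : Int) :
    ((vs.foldl (fun d v => if d.contains v then d else d.insert v k) d).get? x) =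
      match d.get? x with
      | some w => some w
      | none => if x ∈ vs then some k else none := by
  induction vs generalizing d with
  | nil => rcases h : d.get? x <;> simp [h]
  | cons v vs ih =>
    simp only [List.foldl_cons]
    by_cases hc : d.contains v
    · rw [if_pos hc, ih]
      rcases hx : d.get? x with _ | w
      · by_cases hxv : x = v
        · subst hxv
          rw [PySem.Dict.contains_eq_isSome_get?, hx] at hc
          simp at hc
        · simp [hxv]
      · rfl
    · rw [if_neg hc, ih, PySem.Dict.get?_insert]
      by_cases hxv : x = v
      · subst hxv
        rw [PySem.Dict.contains_eq_isSome_get?] at hc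
        rcases hx : d.get? x with _ | w
        · simp
        · rw [hx] at hc; simp at hc
      · simp [hxv]

theorem get?_buildAux (dist : List (Int × List Int)) (d : PySem.Dict Int Int) (x : Int) :
    ((dist.foldl
        (fun d kv => kv.2.foldl (fun d v => if d.contains v then d else d.insert v kv.1) d)
        d).get? x) =
      match d.get? x with
      | some w => some w
      | none => firstKey dist x := by
  induction dist generalizing d with
  | nil => rcases h : d.get? x <;> simp [h, firstKey]
  | cons kv rest ih =>
    simp only [List.foldl_cons]
    rw [ih, get?_innerFold]
    rcases hx : d.get? x with _ | w
    · by_cases hm : x ∈ kv.2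
      · simp [firstKey, hm]
      · simp [firstKey, hm]
    · rfl

theorem get?_buildFirstKey (dist : List (Int × List Int)) (x : Int) :
    (buildFirstKey dist).get? x = firstKey dist x := by
  rw [buildFirstKey, get?_buildAux]
  simp

theorem innerLoopA_eq (acc : List String) (node : Int) (dist : List (Int × List Int)) :
    innerLoopA acc node dist =
      match firstKey dist node with
      | some k => acc ++ [String.mk ("#FF00".toList ++ fmt02X k)]
      | none => acc := by
  induction dist with
  | nil => rfl
  | cons kv rest ih =>
    rcases kv with ⟨k, vs⟩
    by_cases hm : node ∈ vs
    · simp [innerLoopA, firstKey, hm]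
    · simp [innerLoopA, firstKey, hm, ih]

-- ===== VERDICT (by name: the statement is the Claim_ definition above) =====
theorem node_k_spec : Claim_equal_node_k := by
  intro graph dist _
  unfold Spec_node_k node_k node_k_alt
  simp only []
  congr 1
  funext acc node
  rw [innerLoopA_eq, get?_buildFirstKey]
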